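-- pv_equiv track=rewrite | github.com/K-Y-k/Coding_Test_Python_SQL | 프로그래머스/Lv2/귤 고르기-딕셔너리 정렬.py | solution
-- ===== SOURCE A (Python) =====
-- def solution(k, tangerine):
--     answer = 0                        # 담긴 종류의 수 변수 선언
--     tagerine_dic = {}
--
--     for i in tangerine:               # 딕셔너리에 넣기
--         if i not in tagerine_dic:
--             tagerine_dic[i] = 1
--         else:
--             tagerine_dic[i] += 1
--
--
--     count = 0                                                                            # 담긴 종류의 수 변수 선언
--     tagerine_dic = dict(sorted(tagerine_dic.items(), key=lambda x:x[1], reverse=True))   # value 값 기준의 내림차순으로 정렬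
--
--     for i, value in enumerate(tagerine_dic):
--         if count + tagerine_dic[value] < k:                                               # value값을 더한 것이 k개보다 작으면 더해주고 그 종류를 카운팅
--             count += tagerine_dic[value]
--             answer += 1
--         elif count + tagerine_dic[value] >= k:                                            # value값을 더한 것이 k개보다 같거나 크면 더해주고 그 종류를 카운팅하고 반복 종료
--             count += tagerine_dic[value]
--             answer += 1
--             break
--
--
--     return answer
-- ===== SOURCE B (Python) =====
-- def solution(k, tangerine):
--     # counting-sort by frequency: bucket the tangerine-type counts, then walk
--     # bucket sizes from the largest frequency down -- no comparison sort.
--     freq = {}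
--     for t in tangerine:
--         freq[t] = freq.get(t, 0) + 1
--     buckets = {}
--     maxf = 0
--     for f in freq.values():
--         buckets[f] = buckets.get(f, 0) + 1
--         if f > maxf:
--             maxf = f
--     total = 0
--     answer = 0
--     for f in range(maxf, 0, -1):
--         for _ in range(buckets.get(f, 0)):
--             total += f
--             answer += 1
--             if total >= k:
--                 return answer
--     return answer
-- ===== Notes on version B (the rewrite author's own statement) =====
-- stated objective: faster
-- what changed: replaces sorting the frequency dictionary by value (comparison sort) with a counting-sort: frequencies are bucketed into a freq->how-many-types dict and walked from the largest frequency down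
import Mathlib
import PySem

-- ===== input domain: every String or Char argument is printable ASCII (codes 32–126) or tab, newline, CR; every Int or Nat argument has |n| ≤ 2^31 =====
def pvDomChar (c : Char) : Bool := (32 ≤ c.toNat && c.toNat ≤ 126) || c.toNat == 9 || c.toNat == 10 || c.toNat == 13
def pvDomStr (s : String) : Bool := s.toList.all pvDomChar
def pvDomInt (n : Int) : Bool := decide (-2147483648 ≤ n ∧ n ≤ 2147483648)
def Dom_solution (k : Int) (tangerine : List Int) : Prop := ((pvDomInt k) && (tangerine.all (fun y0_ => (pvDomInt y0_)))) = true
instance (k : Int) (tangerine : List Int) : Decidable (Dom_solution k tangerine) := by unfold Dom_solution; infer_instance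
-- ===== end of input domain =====

-- B replaces A's comparison sort of the count dictionary by counting-sort buckets
-- over the frequencies, walked from the largest frequency down (objective: faster).

-- ===== PORT A =====
-- the second loop of A: for i, value in enumerate(dic): …, looking the key up in the dict;
-- the 'elif count + dic[value] >= k' branch is the exact negation of the 'if', so it is the else branch
def solutionLoopA (k : Int) (d : PySem.Dict Int Int) : List (Int × Int) → Int → Int → Int
  | [], _count, answer => answer
  | (_, key) :: rest, count, answer =>
      let v := d.getD key 0   -- Python's d[value]; every enumerated key is a key of d, so the default is never used
      if count + v < k then solutionLoopA k d rest (count + v) (answer + 1)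
      else answer + 1

def solution (k : Int) (tangerine : List Int) : Int :=
  let dic := tangerine.foldl
    (fun d i => if d.contains i = false then d.insert i 1 else d.insert i (d.getD i 0 + 1))
    PySem.Dict.empty
  let dic2 := PySem.Dict.ofList (PySem.List.sorted dic.items (fun x => x.2) true)
  solutionLoopA k dic2 (PySem.List.enumerate dic2.keys) 0 0

-- ===== PORT B =====
-- inner loop 'for _ in range(buckets.get(f, 0)): …' with the early return:
-- Sum.inl (total, answer) = fall through, Sum.inr answer = 'return answer'
def solutionInnerB (k f : Int) : Nat → Int → Int → Sum (Int × Int) Int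
  | 0, total, answer => Sum.inl (total, answer)
  | Nat.succ n, total, answer =>
      if total + f ≥ k then Sum.inr (answer + 1)
      else solutionInnerB k f n (total + f) (answer + 1)

-- outer loop 'for f in range(maxf, 0, -1): …'
def solutionLoopB (k : Int) (b : PySem.Dict Int Int) : List Int → Int → Int → Int
  | [], _total, answer => answer
  | f :: fs, total, answer =>
      match solutionInnerB k f (b.getD f 0).toNat total answer with
      | Sum.inl (total', answer') => solutionLoopB k b fs total' answer'
      | Sum.inr answer' => answer'

def solution_alt (k : Int) (tangerine : List Int) : Int :=
  let freq := tangerine.foldl (fun d t => d.insert t (d.getD t 0 + 1)) PySem.Dict.empty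
  let bm := freq.values.foldl
    (fun (bm : PySem.Dict Int Int × Int) f =>
      (bm.1.insert f (bm.1.getD f 0 + 1), if f > bm.2 then f else bm.2))
    (PySem.Dict.empty, 0)
  solutionLoopB k bm.1 (PySem.List.pyRange bm.2 0 (-1)) 0 0

-- ===== PRECONDITION & SPEC =====
def Spec_solution (k : Int) (tangerine : List Int) (out : Int) : Prop := out = solution_alt k tangerine
instance (k : Int) (tangerine : List Int) (out : Int) : Decidable (Spec_solution k tangerine out) := by unfold Spec_solution; infer_instance

-- ===== CLAIM (what is proved, stated in full; the proofs are below) =====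
def Claim_equal_solution : Prop := ∀ (k : Int) (tangerine : List Int), Dom_solution k tangerine → Spec_solution k tangerine (solution k tangerine)

-- ===== LEMMAS AND PROOFS =====

-- both loops take one type at a time, greedily, and stop as soon as the running total reaches k:
-- their common abstraction over the plain list of counts
def takeCount (k : Int) : List Int → Int → Int → Int
  | [], _total, answer => answer
  | v :: rest, total, answer =>
      if total + v < k then takeCount k rest (total + v) (answer + 1) else answer + 1

-- A's first loop builds Counter(tangerine)
lemma loopA_counter (tangerine : List Int) :
    tangerine.foldl
      (fun d i => if d.contains i = false then d.insert i 1 else d.insert i (d.getD i 0 + 1))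
      PySem.Dict.empty = PySem.Dict.counter tangerine := by
  rw [← PySem.Dict.foldl_insert_getD_add_one_eq_counter]
  congr 1
  funext d i
  by_cases h : d.contains i = false
  · have hg : d.getD i 0 = 0 := by
      rw [PySem.Dict.contains_eq_isSome_get?] at h
      unfold PySem.Dict.getD
      cases hq : d.get? i with
      | none => rfl
      | some v => rw [hq] at h; simp at h
    simp [h, hg]
  · simp [h]

-- A's second loop over the enumerated keys is takeCount over the looked-up values
lemma loopA_eq_takeCount (k : Int) (d : PySem.Dict Int Int) :
    ∀ (ks : List Int) (s count answer : Int),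
      solutionLoopA k d (PySem.List.enumerate ks s) count answer
        = takeCount k (ks.map (fun key => d.getD key 0)) count answer := by
  intro ks
  induction ks with
  | nil => intro s c a; rw [PySem.List.enumerate_nil]; rfl
  | cons x xs ih =>
      intro s c a
      rw [PySem.List.enumerate_cons]
      simp only [List.map, solutionLoopA, takeCount]
      split
      · exact ih (s+1) _ _
      · rfl

-- the inner bounded loop of B consumes one constant block of the expansion
lemma innerB_spec (k f : Int) : ∀ (n : Nat) (total answer : Int) (rest : List Int),
    (match solutionInnerB k f n total answer with
     | Sum.inl (t, a) => takeCount k rest t a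
     | Sum.inr a => a)
      = takeCount k (List.replicate n f ++ rest) total answer := by
  intro n
  induction n with
  | zero => intro t a rest; rfl
  | succ n ih =>
      intro t a rest
      rw [List.replicate_succ, List.cons_append]
      simp only [solutionInnerB, takeCount]
      by_cases h : t + f < k
      · rw [if_pos h, if_neg (by omega)]
        exact ih _ _ _
      · rw [if_neg h, if_pos (by omega)]

-- B's two nested loops are takeCount over the bucket expansion
lemma loopB_eq_takeCount (k : Int) (b : PySem.Dict Int Int) :
    ∀ (fs : List Int) (total answer : Int),
      solutionLoopB k b fs total answer
        = takeCount k (fs.flatMap (fun f => List.replicate (b.getD f 0).toNat f)) total answer := by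
  intro fs
  induction fs with
  | nil => intro t a; rfl
  | cons f fs ih =>
      intro t a
      rw [List.flatMap_cons]
      rw [← innerB_spec]
      simp only [solutionLoopB]
      cases h : solutionInnerB k f (b.getD f 0).toNat t a with
      | inl p => cases p with | mk t' a' => exact ih t' a'
      | inr a' => rfl

-- summing 'count of a in a constant block' over a duplicate-free list of block labels
lemma sum_map_ite_count (a : Int) (c : Int → Nat) :
    ∀ (l : List Int), l.Nodup →
      (l.map (fun f => if f == a then c f else 0)).sum = if a ∈ l then c a else 0 := by
  intro l
  induction l with
  | nil => intro _; simp
  | cons x xs ih =>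
      intro hnd
      rw [List.nodup_cons] at hnd
      simp only [List.map, List.sum_cons, ih hnd.2, List.mem_cons]
      by_cases hxa : x = a
      · subst hxa
        simp [hnd.1]
      · simp [hxa, Ne.symm hxa]

-- the bucket expansion of vs is a permutation of vs …
lemma expansion_perm (vs : List Int) (M : Int)
    (hpos : ∀ v ∈ vs, 1 ≤ v) (hM : ∀ v ∈ vs, v ≤ M) :
    ((PySem.List.pyRange M 0 (-1)).flatMap (fun f => List.replicate (vs.count f) f)).Perm vs := by
  rw [List.perm_iff_count]
  intro a
  rw [List.count_flatMap]
  have h1 : (List.map (List.count a ∘ fun f => List.replicate (vs.count f) f) (PySem.List.pyRange M 0 (-1)))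
      = (PySem.List.pyRange M 0 (-1)).map (fun f => if f == a then vs.count f else 0) := by
    apply List.map_congr_left
    intro f _
    simp only [Function.comp_apply, List.count_replicate]
  have hnd : (PySem.List.pyRange M 0 (-1)).Nodup := by
    rw [PySem.List.pyRange_neg_one_eq_reverse]
    exact (List.nodup_reverse).mpr (PySem.List.nodup_pyRange_one _ _)
  rw [h1, sum_map_ite_count a _ _ hnd]
  by_cases hmem : a ∈ PySem.List.pyRange M 0 (-1)
  · simp [hmem]
  · rw [if_neg hmem]
    symm
    rw [List.count_eq_zero]
    intro ha
    exact hmem (PySem.List.mem_pyRange_neg_one.mpr ⟨by have := hpos a ha; omega, hM a ha⟩)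

-- … and it is ordered largest-first
lemma expansion_pairwise (vs : List Int) (M : Int) :
    ((PySem.List.pyRange M 0 (-1)).flatMap (fun f => List.replicate (vs.count f) f)).Pairwise
      (fun a b => b ≤ a) := by
  rw [List.pairwise_flatMap]
  constructor
  · intro f _
    rw [List.pairwise_replicate]
    right; exact le_refl f
  · have : (PySem.List.pyRange M 0 (-1)).Pairwise (fun a b => b < a) := by
      rw [PySem.List.pyRange_neg_one_eq_reverse, List.pairwise_reverse]
      exact PySem.List.pairwise_lt_pyRange_one _ _
    refine this.imp ?_
    intro f1 f2 h x hx y hy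
    rw [List.eq_of_mem_replicate hx] at *
    rw [List.eq_of_mem_replicate hy]
    omega

-- two largest-first rearrangements of the same multiset are the same list
lemma desc_perm_eq (S E : List Int) (hperm : S.Perm E)
    (hS : S.Pairwise (fun a b => b ≤ a)) (hE : E.Pairwise (fun a b => b ≤ a)) : S = E := by
  rw [← List.reverse_inj]
  exact PySem.List.eq_of_perm_of_pairwise_le_of_injective (fun x => x) Function.injective_id
    ((List.reverse_perm S).trans (hperm.trans (List.reverse_perm E).symm))
    (List.pairwise_reverse.mpr hS) (List.pairwise_reverse.mpr hE)

-- the value-sorted item list of the counter still has duplicate-free keys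
lemma sorted_fst_nodup (tangerine : List Int) :
    ((PySem.List.sorted (PySem.Dict.counter tangerine).items (fun x => x.2) true).map Prod.fst).Nodup := by
  have hp : ((PySem.List.sorted (PySem.Dict.counter tangerine).items (fun x => x.2) true).map Prod.fst).Perm
      ((PySem.Dict.counter tangerine).items.map Prod.fst) :=
    (PySem.List.sorted_perm _ _ _).map Prod.fst
  exact hp.nodup_iff.mpr (PySem.Dict.nodup_keys_counter tangerine)

-- the rebuilt dict dict(sorted(dic.items(), …)) has exactly the sorted items
lemma dic2_items (tangerine : List Int) :
    (PySem.Dict.ofList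
        (PySem.List.sorted (PySem.Dict.counter tangerine).items (fun x => x.2) true)).items
      = PySem.List.sorted (PySem.Dict.counter tangerine).items (fun x => x.2) true := by
  show (PySem.Dict.empty.update _).items = _
  unfold PySem.Dict.update
  have := PySem.Dict.items_foldl_insert_fresh
    (PySem.List.sorted (PySem.Dict.counter tangerine).items (fun x => x.2) true)
    Prod.fst Prod.snd PySem.Dict.empty (by intro a _; rfl) (sorted_fst_nodup tangerine)
  simpa using this

-- every value of the counter is a count of a present element, hence at least 1
lemma counter_values_pos (tangerine : List Int) :
    ∀ v ∈ (PySem.Dict.counter tangerine).values, 1 ≤ v := by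
  intro v hv
  have : (PySem.Dict.counter tangerine).values = ((PySem.Dict.counter tangerine).items).map Prod.snd := rfl
  rw [this, PySem.Dict.items_counter] at hv
  simp only [List.map_map, List.mem_map] at hv
  obtain ⟨x, hx, hxv⟩ := hv
  rw [PySem.Set.mem_ofList] at hx
  have : 0 < List.count x tangerine := List.count_pos_iff.mpr hx
  simp only [Function.comp_apply] at hxv
  omega

-- B's running maximum is Python's max
lemma runmax_eq_max : (fun (m f : Int) => if f > m then f else m) = (fun (m f : Int) => max m f) := by
  funext m f; simp only [max_def]; split <;> split <;> omega

-- ===== VERDICT (by name: the statement is the Claim_ definition above) =====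
theorem solution_spec : Claim_equal_solution := by
  intro k tangerine _
  show solution k tangerine = solution_alt k tangerine
  unfold solution solution_alt
  dsimp only
  rw [loopA_counter, PySem.Dict.foldl_insert_getD_add_one_eq_counter,
    PySem.List.foldl_prod_mk (fun (d : PySem.Dict Int Int) (f : Int) => d.insert f (d.getD f 0 + 1))
      (fun (m f : Int) => if f > m then f else m)]
  set vs := (PySem.Dict.counter tangerine).values with hvs
  set dic2 := PySem.Dict.ofList
      (PySem.List.sorted (PySem.Dict.counter tangerine).items (fun x => x.2) true) with hdic2
  rw [loopB_eq_takeCount, loopA_eq_takeCount]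
  rw [PySem.Dict.foldl_insert_getD_add_one_eq_counter, runmax_eq_max]
  -- identify the two value lists
  have hknd : dic2.keys.Nodup := by
    show (dic2.items.map Prod.fst).Nodup
    rw [hdic2, dic2_items]
    exact sorted_fst_nodup tangerine
  have hAlist : dic2.keys.map (fun key => dic2.getD key 0)
      = (PySem.List.sorted (PySem.Dict.counter tangerine).items (fun x => x.2) true).map Prod.snd := by
    rw [← PySem.Dict.values_eq_map_keys dic2 hknd 0]
    show dic2.items.map Prod.snd = _
    rw [hdic2, dic2_items]
  have hBfun : (fun f => List.replicate (((PySem.Dict.counter vs).getD f 0)).toNat f)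
      = fun f => List.replicate (vs.count f) f := by
    funext f; rw [PySem.Dict.getD_counter, Int.toNat_natCast]
  rw [hAlist, hBfun]
  congr 1
  -- the sorted value list equals the bucket expansion
  have hM : ∀ v ∈ vs, v ≤ vs.foldl max 0 := (PySem.List.le_foldl_max vs 0).2
  have hpos : ∀ v ∈ vs, 1 ≤ v := counter_values_pos tangerine
  have hSperm : ((PySem.List.sorted (PySem.Dict.counter tangerine).items (fun x => x.2) true).map Prod.snd).Perm vs :=
    (PySem.List.sorted_perm _ _ _).map Prod.snd
  have hEperm := expansion_perm vs (vs.foldl max 0) hpos hM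
  refine desc_perm_eq _ _ (hSperm.trans hEperm.symm) ?_ (expansion_pairwise vs _)
  rw [List.pairwise_map]
  exact PySem.List.sorted_pairwise_rev _ _
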